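-- pv_equiv track=rewrite | github.com/xcy103/personal_python_algorithm_note | technique/DP/树状数组-线段树优化DP/3915. Maximum Sum of Alternating Subsequence With Distance at Least K.py | maxAlternatingSum
-- ===== SOURCE A (Python) =====
-- from bisect import bisect_left
--
-- class Fenwick:
--     def __init__(self, n: int):
--         self.f = [0] * n
--
--     def update(self, i: int, val: int) -> None:
--         f = self.f
--         while i < len(f):
--             f[i] = max(f[i], val)
--             i += i & -i
--
--     def pre_max(self, i: int) -> int:
--         f = self.f
--         res = 0
--         while i > 0:
--             res = max(res, f[i])
--             i &= i - 1
--         return res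
--
-- def maxAlternatingSum(nums: list[int], k: int) -> int:
--     # 离散化 nums
--     sorted_nums = sorted(set(nums))
--
--     n = len(nums)
--     f_inc = [0] * n  # f_inc[i] 表示以 nums[i] 结尾且最后两项递增的交替子序列的最大和
--     f_dec = [0] * n  # f_dec[i] 表示以 nums[i] 结尾且最后两项递减的交替子序列的最大和
--
--     # 值域树状数组
--     m = len(sorted_nums)
--     inc = Fenwick(m + 1)  # 维护 f_inc[i] 的最大值
--     dec = Fenwick(m + 1)  # 维护 f_dec[i] 的最大值
--
--     for i, x in enumerate(nums):
--         if i >= k: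
--             # 在这个时候才把 f_inc[i-k] 和 f_dec[i-k] 添加到值域树状数组中，从而保证转移来源的下标 <= i-k
--             j = nums[i - k]
--             inc.update(m - j, f_inc[i - k])  # m-j 可以把后缀变成前缀
--             dec.update(j + 1, f_dec[i - k])
--
--         j = bisect_left(sorted_nums, x)
--         nums[i] = j  # 注意这里修改了 nums[i]，这样上面的 nums[i-k] 无需二分
--
--         f_inc[i] = dec.pre_max(j) + x          # 计算满足 nums[i'] < x 的 f_dec[i'] 的最大值
--         f_dec[i] = inc.pre_max(m - 1 - j) + x  # 计算满足 nums[i'] > x 的 f_inc[i'] 的最大值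
--
--     return max(max(f_inc), max(f_dec))  # 枚举子序列以 nums[i] 结尾
-- ===== SOURCE B (Python) =====
-- def maxAlternatingSum(nums: list[int], k: int) -> int:
--     # Quadratic DP: f_inc[i] / f_dec[i] = best alternating sum of a subsequence
--     # ending at index i whose last step goes up / down, where consecutive chosen
--     # indices must be at least k apart.
--     n = len(nums)
--     f_inc = [0] * n
--     f_dec = [0] * n
--     for i, x in enumerate(nums):
--         best_dec = best_inc = 0
--         for j in range(i - k + 1):
--             if nums[j] < x and f_dec[j] > best_dec:
--                 best_dec = f_dec[j]
--             if nums[j] > x and f_inc[j] > best_inc: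
--                 best_inc = f_inc[j]
--         f_inc[i] = best_dec + x
--         f_dec[i] = best_inc + x
--     return max(max(f_inc), max(f_dec))
-- ===== Notes on version B (the rewrite author's own statement) =====
-- stated objective: simpler
-- what changed: Replaces the value discretization plus two max-Fenwick trees by a direct quadratic DP whose inner loop scans all indices j <= i-k, removing the Fenwick data structure; A also mutates nums in place to discretized ranks, which B does not, so the equivalence is about the return value only; Pre_ excludes empty nums (A raises ValueError), k < 0 (A raises IndexError) and k = 0, where A's Fenwick update diverges or uses raw values through negative-index wraparound as tree positions.
-- outside the precondition, e.g. on maxAlternatingSum([0, 1, 2], 0): A returns 2, B returns 3; on maxAlternatingSum([1], 0): A does not finish within the time limit, B returns 1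
import Mathlib
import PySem

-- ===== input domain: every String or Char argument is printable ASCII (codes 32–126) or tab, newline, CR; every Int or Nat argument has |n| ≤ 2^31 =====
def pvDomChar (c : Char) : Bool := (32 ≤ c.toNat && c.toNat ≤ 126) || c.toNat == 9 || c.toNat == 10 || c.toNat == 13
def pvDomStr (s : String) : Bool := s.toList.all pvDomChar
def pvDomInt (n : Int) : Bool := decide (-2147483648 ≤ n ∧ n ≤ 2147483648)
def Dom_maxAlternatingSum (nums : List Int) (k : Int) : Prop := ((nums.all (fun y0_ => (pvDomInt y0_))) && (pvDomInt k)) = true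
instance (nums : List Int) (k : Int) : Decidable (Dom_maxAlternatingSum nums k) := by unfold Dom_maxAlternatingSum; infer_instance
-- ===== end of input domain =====

-- B replaces A's discretization + two max-Fenwick trees by a direct quadratic DP with an
-- inner scan over the indices j ≤ i-k ("simpler"); A mutates nums in place to discretized
-- ranks and B does not, so the equivalence proved here is about the RETURN value only.

-- ===== PORT A =====

-- needed by the ports' termination ('i &= i - 1' decreases, 'i += i & -i' increases)
theorem pvLandLt (i : Nat) (h : 0 < i) : i &&& (i - 1) < i :=
  lt_of_le_of_lt Nat.and_le_right (by omega)

-- Fenwick.update: 'while i < len(f): f[i] = max(f[i], v); i += i & -i'.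
-- For i ≥ 1, Python's 'i & -i' (two's complement) = i - (i & (i-1)); under Pre_ every call
-- starts at i ≥ 1, and the guard 0 < i only makes the function total (at i = 0 Python
-- loops forever, at i < 0 it wraps negatively — both only reachable outside Pre_).
def pvFenUpdate (f : List Int) (i : Nat) (v : Int) : List Int :=
  if h : 0 < i ∧ i < f.length then
    pvFenUpdate (f.set i (max (f.getD i 0) v)) (i + (i - (i &&& (i - 1)))) v
  else f
termination_by f.length - i
decreasing_by
  simp only [List.length_set]
  have := pvLandLt i h.1
  omega

-- Fenwick.pre_max: 'res = 0; while i > 0: res = max(res, f[i]); i &= i - 1'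
-- (f.getD i 0 = f[i]: under Pre_ every visited index is < len(f), so no IndexError).
def pvFenPreMax (f : List Int) (res : Int) (i : Nat) : Int :=
  if h : 0 < i then pvFenPreMax f (max res (f.getD i 0)) (i &&& (i - 1)) else res
termination_by i
decreasing_by exact pvLandLt i h

structure PvStateA where
  nums : List Int
  fI : List Int
  fD : List Int
  inc : List Int
  dec : List Int

-- one iteration of A's 'for i, x in enumerate(nums)' body (x read from the current list;
-- indices i not yet reached still hold their original values)
def pvStepA (sorted : List Int) (m : Nat) (k : Int) (st : PvStateA) (i : Nat) : PvStateA :=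
  let x := st.nums.getD i 0
  let st1 :=
    if k ≤ (i : Int) then
      -- j = nums[i-k]: under Pre_ (1 ≤ k ≤ i) this index is in range and already holds a
      -- rank ≥ 0, so the .getD 0 / .toNat below are exact (pyGet? = none only where A raises)
      let j : Int := (PySem.List.pyGet? st.nums ((i : Int) - k)).getD 0
      let t : Nat := ((i : Int) - k).toNat
      { st with
        inc := pvFenUpdate st.inc (m - j.toNat) (st.fI.getD t 0),
        dec := pvFenUpdate st.dec (j.toNat + 1) (st.fD.getD t 0) }
    else st
  let j : Nat := PySem.List.bisectLeft sorted x
  -- m - 1 - j as Nat subtraction is exact: under Pre_, x ∈ sorted so j ≤ m - 1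
  { nums := st1.nums.set i (j : Int),
    fI := st1.fI.set i (pvFenPreMax st1.dec 0 j + x),
    fD := st1.fD.set i (pvFenPreMax st1.inc 0 (m - 1 - j) + x),
    inc := st1.inc, dec := st1.dec }

def maxAlternatingSum (nums : List Int) (k : Int) : Int :=
  let sorted_nums := PySem.List.sorted (PySem.Set.ofList nums) (fun x => x) false
  let n := nums.length
  let m := sorted_nums.length
  let st := (List.range n).foldl (pvStepA sorted_nums m k)
    ⟨nums, List.replicate n 0, List.replicate n 0,
     List.replicate (m + 1) 0, List.replicate (m + 1) 0⟩
  -- max(max(f_inc), max(f_dec)); .getD 0 only fires for nums = [] where Python raises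
  max ((PySem.List.max? st.fI (fun x => x)).getD 0)
      ((PySem.List.max? st.fD (fun x => x)).getD 0)

-- ===== PORT B =====

-- inner loop of Source B: 'best_dec = best_inc = 0; for j in range(i - k + 1): …'
def pvInnerB (vals fI fD : List Int) (x : Int) (cnt : Nat) : Int × Int :=
  (List.range cnt).foldl
    (fun bb j =>
      let bd := if vals.getD j 0 < x ∧ bb.1 < fD.getD j 0 then fD.getD j 0 else bb.1
      let bi := if x < vals.getD j 0 ∧ bb.2 < fI.getD j 0 then fI.getD j 0 else bb.2
      (bd, bi)) (0, 0)

def pvStepB (vals : List Int) (k : Int) (st : List Int × List Int) (i : Nat) : List Int × List Int :=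
  let x := vals.getD i 0
  let bb := pvInnerB vals st.1 st.2 x (((i : Int) - k + 1).toNat)
  (st.1.set i (bb.1 + x), st.2.set i (bb.2 + x))

def maxAlternatingSum_alt (nums : List Int) (k : Int) : Int :=
  let n := nums.length
  let st := (List.range n).foldl (pvStepB nums k) (List.replicate n 0, List.replicate n 0)
  max ((PySem.List.max? st.1 (fun x => x)).getD 0)
      ((PySem.List.max? st.2 (fun x => x)).getD 0)

-- ===== PRECONDITION & SPEC =====
-- Pre_ excludes: nums = [] (A raises ValueError in max()); k < 0 (A raises IndexError at
-- nums[i-k]); and k = 0, where A's Fenwick update either diverges (position 0 loops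
-- forever) or writes through accidental negative-index wraparound, using raw values
-- instead of ranks as tree positions — e.g. A returns 2 on ([0, 1, 2], 0) where B returns 3.
def Pre_maxAlternatingSum (nums : List Int) (k : Int) : Prop := nums ≠ [] ∧ 1 ≤ k
instance (nums : List Int) (k : Int) : Decidable (Pre_maxAlternatingSum nums k) := by
  unfold Pre_maxAlternatingSum; infer_instance

def pvWitness_maxAlternatingSum : List Int × Int := ([3, -1, 2], 1)

def Spec_maxAlternatingSum (nums : List Int) (k : Int) (out : Int) : Prop := out = maxAlternatingSum_alt nums k
instance (nums : List Int) (k : Int) (out : Int) : Decidable (Spec_maxAlternatingSum nums k out) := by unfold Spec_maxAlternatingSum; infer_instance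

-- ===== CLAIM (what is proved, stated in full; the proofs are below) =====
def Claim_equal_maxAlternatingSum : Prop := ∀ (nums : List Int) (k : Int), Dom_maxAlternatingSum nums k → Pre_maxAlternatingSum nums k → Spec_maxAlternatingSum nums k (maxAlternatingSum nums k)

-- ===== LEMMAS AND PROOFS =====

theorem pvLandOddEven (m k : Nat) : (2*m+1) &&& (2*k) = 2*(m &&& k) := by
  apply Nat.eq_of_testBit_eq
  intro i
  rw [Nat.testBit_land]
  cases i with
  | zero => simp [Nat.testBit_zero]
  | succ j =>
      simp only [Nat.testBit_add_one, Nat.mul_add_div (by norm_num : 0 < 2),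
        Nat.mul_div_cancel_left _ (by norm_num : 0 < 2)]
      simp

theorem pvLandEvenOdd (m k : Nat) : (2*m) &&& (2*k+1) = 2*(m &&& k) := by
  apply Nat.eq_of_testBit_eq
  intro i
  rw [Nat.testBit_land]
  cases i with
  | zero => simp [Nat.testBit_zero]
  | succ j =>
      simp only [Nat.testBit_add_one, Nat.mul_add_div (by norm_num : 0 < 2),
        Nat.mul_div_cancel_left _ (by norm_num : 0 < 2)]
      simp

-- 2-adic shape of 'i & (i-1)': clearing the lowest set bit
theorem pvLandDecomp (n : Nat) (h : 0 < n) :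
    ∃ a b : Nat, n = 2^a * (2*b+1) ∧ n &&& (n-1) = 2^(a+1) * b := by
  induction n using Nat.strong_induction_on with
  | _ n ih =>
    rcases Nat.even_or_odd n with he | ho
    · obtain ⟨c, hc⟩ := he
      have hc2 : n = 2 * c := by omega
      have hcpos : 0 < c := by omega
      obtain ⟨a, b, h1, h2⟩ := ih c (by omega) hcpos
      refine ⟨a + 1, b, by rw [hc2, h1]; ring, ?_⟩
      have hstep : n &&& (n - 1) = 2 * (c &&& (c - 1)) := by
        rw [hc2]
        have h3 : 2 * c - 1 = 2 * (c - 1) + 1 := by omega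
        rw [h3, pvLandEvenOdd]
      rw [hstep, h2]; ring
    · obtain ⟨b, hb⟩ := ho
      refine ⟨0, b, by omega, ?_⟩
      rw [hb]
      have h3 : 2 * b + 1 - 1 = 2 * b := by omega
      rw [h3, pvLandOddEven, Nat.and_self]
      ring

-- the Fenwick step fact: if i&(i-1) < p < i then p + lowbit(p) ≤ i
theorem pvKeyStep (p i : Nat) (hp : 0 < p) (hpi : p < i) (hl : i &&& (i-1) < p) :
    p + (p - (p &&& (p-1))) ≤ i := by
  obtain ⟨a, b, hpab, hpland⟩ := pvLandDecomp p hp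
  obtain ⟨c, d, hicd, hiland⟩ := pvLandDecomp i (by omega)
  -- p - (p &&& (p-1)) = 2^a
  have hAp : p = 2 * (2^a * b) + 2^a := by rw [hpab]; ring
  have hAl : p &&& (p-1) = 2 * (2^a * b) := by rw [hpland]; ring
  have hlow : p - (p &&& (p-1)) = 2^a := by rw [hAl, hAp, Nat.add_sub_cancel_left]
  rw [hlow]
  have hCi : i = 2 * (2^c * d) + 2^c := by rw [hicd]; ring
  have hCl : i &&& (i-1) = 2 * (2^c * d) := by rw [hiland]; ring
  -- hypotheses: 2^(c+1)*d < p < 2^(c+1)*d + 2^c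
  have hc1 : 2 * (2^c * d) < p := by omega
  have hc2 : p < 2 * (2^c * d) + 2^c := by omega
  -- step 1: a < c
  have hac : a < c := by
    by_contra hge
    rw [Nat.not_lt] at hge   -- c ≤ a
    have h2c : (2:Nat)^a = 2^c * 2^(a-c) := by
      rw [← pow_add]; congr 1; omega
    have hs : p = 2^c * (2^(a-c) * (2*b+1)) := by rw [hpab, h2c]; ring
    set s := 2^(a-c) * (2*b+1) with hsdef
    have h1 : 2^c * (2*d) < 2^c * s := by
      calc 2^c * (2*d) = 2 * (2^c * d) := by ring
      _ < p := hc1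
      _ = 2^c * s := hs
    have h2 : 2^c * s < 2^c * (2*d+1) := by
      calc 2^c * s = p := hs.symm
      _ < 2 * (2^c * d) + 2^c := hc2
      _ = 2^c * (2*d+1) := by ring
    have hpos : 0 < (2:Nat)^c := Nat.two_pow_pos _
    have q1 := Nat.lt_of_mul_lt_mul_left h1
    have q2 := Nat.lt_of_mul_lt_mul_left h2
    omega
  -- step 2: cancel 2^a on both sides of hc2 and conclude
  have h2c : (2:Nat)^c = 2^a * 2^(c-a) := by rw [← pow_add]; congr 1; omega
  set A := (2:Nat)^a with hA
  set E := (2:Nat)^(c-a) with hE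
  have hApos : 0 < A := Nat.two_pow_pos _
  have hc2' : A * (2*b+1) < A * (2*E*d + E) := by
    calc A * (2*b+1) = p := hpab.symm
    _ < 2 * (2^c * d) + 2^c := hc2
    _ = A * (2*E*d + E) := by rw [h2c]; ring
  have hlt : 2*b+1 < 2*E*d + E := Nat.lt_of_mul_lt_mul_left hc2'
  calc p + A = A * (2*b+1+1) := by rw [hpab]; ring
  _ ≤ A * (2*E*d + E) := Nat.mul_le_mul_left A (by omega)
  _ = 2 * (2^c * d) + 2^c := by rw [h2c]; ring
  _ = i := by omega

def pvQchain (q : Nat) : List Nat :=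
  if h : 0 < q then q :: pvQchain (q &&& (q - 1)) else []
termination_by q
decreasing_by exact pvLandLt q h

def pvUchain (len p : Nat) : List Nat :=
  if h : 0 < p ∧ p < len then p :: pvUchain len (p + (p - (p &&& (p - 1)))) else []
termination_by len - p
decreasing_by have := pvLandLt p h.1; omega

theorem pvUchain_mem_ge (len p j : Nat) (h : j ∈ pvUchain len p) : p ≤ j := by
  induction p using pvUchain.induct (len := len) with
  | case1 p hg ih =>
      rw [pvUchain, dif_pos hg] at h
      rcases List.mem_cons.mp h with h | h
      · omega
      · have := ih h
        omega
  | case2 p hg =>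
      rw [pvUchain, dif_neg hg] at h
      simp at h

theorem pvMemUchain (len p i : Nat) (hp : 0 < p) (hpi : p ≤ i) (hl : i &&& (i-1) < p)
    (hil : i < len) : i ∈ pvUchain len p := by
  have hm : i - p < len := by omega
  induction hn : i - p using Nat.strong_induction_on generalizing p with
  | _ t ih =>
    rw [pvUchain, dif_pos (by omega : 0 < p ∧ p < len)]
    rcases Nat.eq_or_lt_of_le hpi with he | hlt
    · exact List.mem_cons.mpr (Or.inl he.symm)
    · refine List.mem_cons.mpr (Or.inr ?_)
      have hstep := pvKeyStep p i hp hlt hl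
      have hlbpos : 0 < p - (p &&& (p-1)) := by
        have := pvLandLt p hp
        omega
      exact ih (i - (p + (p - (p &&& (p-1))))) (by omega) (p + (p - (p &&& (p-1))))
        (by omega) hstep (by omega) (by omega) rfl

theorem pvQchain_mem_le (q j : Nat) (h : j ∈ pvQchain q) : 0 < j ∧ j ≤ q := by
  induction q using pvQchain.induct with
  | case1 q hg ih =>
      rw [pvQchain, dif_pos hg] at h
      rcases List.mem_cons.mp h with h | h
      · omega
      · have := ih h
        have := pvLandLt q hg
        omega
  | case2 q hg =>
      rw [pvQchain, dif_neg hg] at h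
      simp at h

theorem pvIntersect (len p q : Nat) (hp : 0 < p) (hpq : p ≤ q) (hq : q < len) :
    ∃ j, j ∈ pvUchain len p ∧ j ∈ pvQchain q := by
  induction q using Nat.strong_induction_on with
  | _ q ih =>
    have hq0 : 0 < q := by omega
    by_cases hcase : q &&& (q - 1) < p
    · exact ⟨q, pvMemUchain len p q hp hpq hcase hq,
        by rw [pvQchain, dif_pos hq0]; exact List.mem_cons_self⟩
    · rw [Nat.not_lt] at hcase
      have hlt := pvLandLt q hq0
      obtain ⟨j, hj1, hj2⟩ := ih (q &&& (q-1)) hlt hcase (by omega)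
      exact ⟨j, hj1, by rw [pvQchain, dif_pos hq0]; exact List.mem_cons.mpr (Or.inr hj2)⟩

def pvBmax (a : Int) (l : List Int) : Int := l.foldl max a

theorem pvPreMax_eq_bmax (f : List Int) (res : Int) (q : Nat) :
    pvFenPreMax f res q = pvBmax res ((pvQchain q).map (fun j => f.getD j 0)) := by
  induction q using pvQchain.induct generalizing res with
  | case1 q hg ih =>
      rw [pvFenPreMax, dif_pos hg, pvQchain, dif_pos hg, ih]
      rfl
  | case2 q hg =>
      rw [pvFenPreMax, dif_neg hg, pvQchain, dif_neg hg]
      rfl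

theorem pvFenUpdate_length (f : List Int) (i : Nat) (v : Int) :
    (pvFenUpdate f i v).length = f.length := by
  induction f, i using pvFenUpdate.induct (v := v) with
  | case1 f i hg ih =>
      rw [pvFenUpdate, dif_pos hg, ih, List.length_set]
  | case2 f i hg =>
      rw [pvFenUpdate, dif_neg hg]

theorem pvFenUpdate_getD (f : List Int) (p : Nat) (v : Int) (j : Nat) :
    (pvFenUpdate f p v).getD j 0 =
      if j ∈ pvUchain f.length p then max (f.getD j 0) v else f.getD j 0 := by
  induction f, p using pvFenUpdate.induct (v := v) with
  | case1 f p hg ih =>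
      rw [pvFenUpdate, dif_pos hg, pvUchain, dif_pos hg, ih]
      rw [List.length_set]
      by_cases hj : j = p
      · subst hj
        have hnot : j ∉ pvUchain f.length (j + (j - (j &&& (j - 1)))) := by
          intro hmem
          have := pvUchain_mem_ge _ _ _ hmem
          have := pvLandLt j hg.1
          omega
        rw [if_neg hnot, if_pos List.mem_cons_self]
        simp [List.getD_eq_getElem?_getD, hg.2]
      · have : (f.set p (max (f.getD p 0) v)).getD j 0 = f.getD j 0 := by
          simp [List.getD_eq_getElem?_getD, List.getElem?_set_ne (Ne.symm hj)]
        rw [this]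
        by_cases hm : j ∈ pvUchain f.length (p + (p - (p &&& (p - 1))))
        · rw [if_pos hm, if_pos (List.mem_cons.mpr (Or.inr hm))]
        · rw [if_neg hm, if_neg ?_]
          intro hc
          rcases List.mem_cons.mp hc with h | h
          · exact hj h
          · exact hm h
  | case2 f p hg =>
      rw [pvFenUpdate, dif_neg hg, pvUchain, dif_neg hg]
      simp

theorem pvBmax_le (a c : Int) (l : List Int) (ha : a ≤ c) (h : ∀ y ∈ l, y ≤ c) :
    pvBmax a l ≤ c := by
  induction l generalizing a with
  | nil => exact ha
  | cons y t ih =>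
      exact ih (max a y) (max_le ha (h y List.mem_cons_self))
        (fun z hz => h z (List.mem_cons.mpr (Or.inr hz)))

theorem pvPreMaxUpdate (f : List Int) (p : Nat) (v : Int) (q : Nat)
    (hp : 0 < p) (_hpl : p < f.length) (hq : q < f.length) :
    pvFenPreMax (pvFenUpdate f p v) 0 q =
      if p ≤ q then max (pvFenPreMax f 0 q) v else pvFenPreMax f 0 q := by
  rw [pvPreMax_eq_bmax, pvPreMax_eq_bmax]
  have hgetD : ∀ j : Nat, (pvFenUpdate f p v).getD j 0 =
      if j ∈ pvUchain f.length p then max (f.getD j 0) v else f.getD j 0 :=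
    pvFenUpdate_getD f p v
  by_cases hle : p ≤ q
  · rw [if_pos hle]
    obtain ⟨j0, hj0u, hj0q⟩ := pvIntersect f.length p q hp hle hq
    apply le_antisymm
    · -- every element ≤ max (bmax old) v
      apply pvBmax_le
      · exact le_max_of_le_left (PySem.List.le_foldl_max _ _).1
      · intro y hy
        obtain ⟨j, hj, rfl⟩ := List.mem_map.mp hy
        rw [hgetD j]
        have hold : f.getD j 0 ≤ pvBmax 0 ((pvQchain q).map (fun j => f.getD j 0)) :=
          (PySem.List.le_foldl_max _ _).2 _ (List.mem_map.mpr ⟨j, hj, rfl⟩)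
        by_cases hm : j ∈ pvUchain f.length p
        · rw [if_pos hm]
          exact max_le (le_max_of_le_left hold) (le_max_right _ _)
        · rw [if_neg hm]
          exact le_max_of_le_left hold
    · apply max_le
      · -- bmax old ≤ bmax new : pointwise
        apply pvBmax_le
        · exact (PySem.List.le_foldl_max _ _).1
        · intro y hy
          obtain ⟨j, hj, rfl⟩ := List.mem_map.mp hy
          have hnew : (pvFenUpdate f p v).getD j 0 ≤
              pvBmax 0 ((pvQchain q).map (fun j => (pvFenUpdate f p v).getD j 0)) :=
            (PySem.List.le_foldl_max _ _).2 _ (List.mem_map.mpr ⟨j, hj, rfl⟩)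
          refine le_trans ?_ hnew
          rw [hgetD j]
          by_cases hm : j ∈ pvUchain f.length p
          · rw [if_pos hm]; exact le_max_left _ _
          · rw [if_neg hm]
      · -- v ≤ bmax new via the shared index j0
        have hnew : (pvFenUpdate f p v).getD j0 0 ≤
            pvBmax 0 ((pvQchain q).map (fun j => (pvFenUpdate f p v).getD j 0)) :=
          (PySem.List.le_foldl_max _ _).2 _ (List.mem_map.mpr ⟨j0, hj0q, rfl⟩)
        refine le_trans ?_ hnew
        rw [hgetD j0, if_pos hj0u]
        exact le_max_right _ _
  · rw [if_neg hle]
    congr 1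
    apply List.map_congr_left
    intro j hj
    have hjle := pvQchain_mem_le q j hj
    have hnot : j ∉ pvUchain f.length p := by
      intro hm
      have := pvUchain_mem_ge _ _ _ hm
      omega
    rw [hgetD j, if_neg hnot]

theorem pvPreMax_replicate (len q : Nat) :
    pvFenPreMax (List.replicate len (0:Int)) 0 q = 0 := by
  rw [pvPreMax_eq_bmax]
  apply le_antisymm
  · apply pvBmax_le _ _ _ le_rfl
    intro y hy
    obtain ⟨j, hj, rfl⟩ := List.mem_map.mp hy
    simp [List.getD_eq_getElem?_getD, List.getElem?_replicate]
    split <;> simp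
  · exact (PySem.List.le_foldl_max _ _).1

-- ---- loop reification: the two foldl's over List.range as step-indexed recursions ----

def pvProcA (S : List Int) (m : Nat) (k : Int) (origs : List Int) : Nat → PvStateA
  | 0 => ⟨origs, List.replicate origs.length 0, List.replicate origs.length 0,
          List.replicate (m + 1) 0, List.replicate (m + 1) 0⟩
  | i + 1 => pvStepA S m k (pvProcA S m k origs i) i

def pvProcB (origs : List Int) (k : Int) : Nat → List Int × List Int
  | 0 => (List.replicate origs.length 0, List.replicate origs.length 0)
  | i + 1 => pvStepB origs k (pvProcB origs k i) i

theorem pvFoldA (S : List Int) (m : Nat) (k : Int) (origs : List Int) (nn : Nat) :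
    (List.range nn).foldl (pvStepA S m k)
      ⟨origs, List.replicate origs.length 0, List.replicate origs.length 0,
       List.replicate (m + 1) 0, List.replicate (m + 1) 0⟩ = pvProcA S m k origs nn := by
  induction nn with
  | zero => rfl
  | succ t ih => rw [List.range_succ, List.foldl_append, ih]; rfl

theorem pvFoldB (origs : List Int) (k : Int) (nn : Nat) :
    (List.range nn).foldl (pvStepB origs k)
      (List.replicate origs.length 0, List.replicate origs.length 0) = pvProcB origs k nn := by
  induction nn with
  | zero => rfl
  | succ t ih => rw [List.range_succ, List.foldl_append, ih]; rfl

-- ---- the discretization: S = sorted(set(nums)), ranks via bisect_left ----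

def pvS (origs : List Int) : List Int :=
  PySem.List.sorted (PySem.Set.ofList origs) (fun x => x) false

def pvRank (S : List Int) (v : Int) : Nat := PySem.List.bisectLeft S v

theorem pvS_pairwise (origs : List Int) : (pvS origs).Pairwise (· < ·) := by
  unfold pvS
  exact PySem.List.sorted_ofList_pairwise_lt origs

theorem pvS_mem (origs : List Int) (v : Int) (hv : v ∈ origs) : v ∈ pvS origs := by
  unfold pvS
  rw [PySem.List.mem_sorted, PySem.Set.mem_ofList]
  exact hv

theorem pvRank_getElem (S : List Int) (hS : S.Pairwise (· < ·)) (v : Int) (hv : v ∈ S) :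
    ∃ h : pvRank S v < S.length, S[pvRank S v] = v := by
  obtain ⟨hle, hlt, hge⟩ := PySem.List.bisectLeft_spec S v (hS.imp le_of_lt)
  rw [show PySem.List.bisectLeft S v = pvRank S v from rfl] at hle hlt hge
  obtain ⟨iv, hiv, hSv⟩ := List.mem_iff_getElem.mp hv
  have hivge : pvRank S v ≤ iv := by
    by_contra hc
    have h2 := hlt iv hiv (by omega)
    rw [hSv] at h2
    omega
  have hlen : pvRank S v < S.length := Nat.lt_of_le_of_lt hivge hiv
  refine ⟨hlen, ?_⟩
  have h1 : v ≤ S[pvRank S v] := hge _ hlen le_rfl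
  rcases Nat.eq_or_lt_of_le hivge with he | hltiv
  · have h3 : S[pvRank S v]? = some v := by
      rw [he, List.getElem?_eq_getElem hiv, hSv]
    rw [List.getElem?_eq_getElem hlen] at h3
    exact Option.some.inj h3
  · have h4 := List.pairwise_iff_getElem.mp hS _ _ hlen hiv hltiv
    rw [hSv] at h4
    omega

theorem pvRank_lt_len (S : List Int) (hS : S.Pairwise (· < ·)) (v : Int) (hv : v ∈ S) :
    pvRank S v < S.length :=
  (pvRank_getElem S hS v hv).1

theorem pvRank_lt_iff (S : List Int) (hS : S.Pairwise (· < ·)) (v : Int) (hv : v ∈ S)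
    (x : Int) : pvRank S v < pvRank S x ↔ v < x := by
  unfold pvRank
  obtain ⟨hlen, hSv⟩ := pvRank_getElem S hS v hv
  obtain ⟨hle, hlt, hge⟩ := PySem.List.bisectLeft_spec S x (hS.imp le_of_lt)
  constructor
  · intro h
    have h2 := hlt _ hlen h
    rw [hSv] at h2
    exact h2
  · intro h
    by_contra hc
    have h2 := hge _ hlen (Nat.not_lt.mp hc)
    rw [hSv] at h2
    omega

-- ---- B's inner loop computes a filtered running max ----

theorem pvBmax_append (a : Int) (l : List Int) (y : Int) :
    pvBmax a (l ++ [y]) = max (pvBmax a l) y := by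
  simp [pvBmax, List.foldl_append]

theorem pvInnerB_eq (vals fI fD : List Int) (x : Int) (cnt : Nat) :
    pvInnerB vals fI fD x cnt =
      (pvBmax 0 (((List.range cnt).filter (fun t => decide (vals.getD t 0 < x))).map
          (fun t => fD.getD t 0)),
       pvBmax 0 (((List.range cnt).filter (fun t => decide (x < vals.getD t 0))).map
          (fun t => fI.getD t 0))) := by
  induction cnt with
  | zero => rfl
  | succ t ih =>
      unfold pvInnerB at ih ⊢
      rw [List.range_succ, List.foldl_append, ih, List.filter_append, List.filter_append,
        List.map_append, List.map_append]
      simp only [List.foldl_cons, List.foldl_nil, List.filter_cons, List.filter_nil]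
      rw [Prod.mk.injEq]
      constructor
      · by_cases hvx : vals.getD t 0 < x
        · simp only [hvx, decide_true, if_true, true_and, List.map_cons, List.map_nil,
            pvBmax_append]
          split <;> omega
        · simp only [hvx, decide_false, Bool.false_eq_true, if_false, false_and,
            List.map_nil, List.append_nil]
      · by_cases hvx : x < vals.getD t 0
        · simp only [hvx, decide_true, if_true, true_and, List.map_cons, List.map_nil,
            pvBmax_append]
          split <;> omega
        · simp only [hvx, decide_false, Bool.false_eq_true, if_false, false_and,
            List.map_nil, List.append_nil]

-- ---- the main loop invariant: A's Fenwick state answers exactly B's inner-loop maxima ----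

theorem pvInvariant (origs : List Int) (k : Int) (hne : origs ≠ []) (hk : 1 ≤ k) :
    ∀ i, i ≤ origs.length →
    (pvProcA (pvS origs) (pvS origs).length k origs i).fI = (pvProcB origs k i).1 ∧
    (pvProcA (pvS origs) (pvS origs).length k origs i).fD = (pvProcB origs k i).2 ∧
    (pvProcA (pvS origs) (pvS origs).length k origs i).nums.length = origs.length ∧
    (pvProcB origs k i).1.length = origs.length ∧
    (pvProcB origs k i).2.length = origs.length ∧
    (pvProcA (pvS origs) (pvS origs).length k origs i).inc.length = (pvS origs).length + 1 ∧
    (pvProcA (pvS origs) (pvS origs).length k origs i).dec.length = (pvS origs).length + 1 ∧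
    (∀ t, t < origs.length →
      (pvProcA (pvS origs) (pvS origs).length k origs i).nums.getD t 0 =
        if t < i then ((pvRank (pvS origs) (origs.getD t 0) : Nat) : Int) else origs.getD t 0) ∧
    (∀ q, q ≤ (pvS origs).length →
      pvFenPreMax (pvProcA (pvS origs) (pvS origs).length k origs i).inc 0 q =
        pvBmax 0 (((List.range (((i : Int) - k).toNat)).filter
            (fun t => decide ((pvS origs).length - pvRank (pvS origs) (origs.getD t 0) ≤ q))).map
          (fun t => (pvProcB origs k i).1.getD t 0))) ∧
    (∀ q, q ≤ (pvS origs).length →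
      pvFenPreMax (pvProcA (pvS origs) (pvS origs).length k origs i).dec 0 q =
        pvBmax 0 (((List.range (((i : Int) - k).toNat)).filter
            (fun t => decide (pvRank (pvS origs) (origs.getD t 0) + 1 ≤ q))).map
          (fun t => (pvProcB origs k i).2.getD t 0))) := by
  have hS := pvS_pairwise origs
  have hmemS : ∀ t, t < origs.length → origs.getD t 0 ∈ pvS origs := by
    intro t ht
    rw [List.getD_eq_getElem _ _ ht]
    exact pvS_mem origs _ (List.getElem_mem ht)
  have hr : ∀ t, t < origs.length → pvRank (pvS origs) (origs.getD t 0) < (pvS origs).length :=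
    fun t ht => pvRank_lt_len _ hS _ (hmemS t ht)
  intro i
  induction i with
  | zero =>
      intro _
      have hc0 : (((0 : Nat) : Int) - k).toNat = 0 := by omega
      refine ⟨rfl, rfl, by simp [pvProcA], by simp [pvProcB], by simp [pvProcB],
        by simp [pvProcA], by simp [pvProcA], ?_, ?_, ?_⟩
      · intro t ht
        simp [pvProcA]
      · intro q hq
        rw [hc0]
        simp only [List.range_zero, List.filter_nil, List.map_nil]
        exact pvPreMax_replicate _ _
      · intro q hq
        rw [hc0]
        simp only [List.range_zero, List.filter_nil, List.map_nil]
        exact pvPreMax_replicate _ _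
  | succ i ih =>
      intro hi1
      have hi : i < origs.length := by omega
      obtain ⟨hFI, hFD, hNL, hBL1, hBL2, hIL, hDL, hNums, hInc, hDec⟩ := ih (by omega)
      -- shorthands
      set S := pvS origs with hSdef
      set m := S.length with hmdef
      set stA := pvProcA S m k origs i with hstA
      set stB := pvProcB origs k i with hstB
      have hm0 : 0 < m := by
        have := hmemS 0 (by cases origs with | nil => exact absurd rfl hne | cons a l => simp)
        have : S ≠ [] := List.ne_nil_of_mem this
        exact List.length_pos_iff.mpr this
      -- the current element
      have hx : stA.nums.getD i 0 = origs.getD i 0 := by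
        rw [hNums i hi]
        simp
      have hxS : origs.getD i 0 ∈ S := hmemS i hi
      have hrx : pvRank S (origs.getD i 0) < m := hr i hi
      have hbis : PySem.List.bisectLeft S (stA.nums.getD i 0) = pvRank S (origs.getD i 0) := by
        rw [hx]; rfl
      -- step the two processes
      have hA1 : pvProcA S m k origs (i + 1) = pvStepA S m k stA i := rfl
      have hB1 : pvProcB origs k (i + 1) = pvStepB origs k stB i := rfl
      rw [hA1, hB1]
      by_cases hki : k ≤ (i : Int)
      · -- an index is inserted this round: t0 = i - k
        -- c = i - k as a Nat
        obtain ⟨c, hc⟩ : ∃ c : Nat, (i : Int) - k = (c : Int) := ⟨((i : Int) - k).toNat, by omega⟩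
        have hci : c < i := by omega
        have hcn : c < origs.length := by omega
        have hc1 : (((i + 1 : Nat) : Int) - k).toNat = c + 1 := by push_cast; omega
        have hcnt : (((i : Int) - k + 1)).toNat = c + 1 := by omega
        -- the rank stored at position c
        have hcnt' : (((c : Int) + 1)).toNat = c + 1 := by omega
        have hjget : (PySem.List.pyGet? stA.nums ((c : Int))).getD 0 =
            ((pvRank S (origs.getD c 0) : Nat) : Int) := by
          rw [PySem.List.pyGet?_natCast,
            List.getElem?_eq_getElem (by rw [hNL]; exact hcn)]
          have : stA.nums[c] = stA.nums.getD c 0 := (List.getD_eq_getElem _ _ _).symm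
          rw [Option.getD_some, this, hNums c hcn, if_pos hci]
        have hrc : pvRank S (origs.getD c 0) < m := hr c hcn
        -- unfold the two steps
        simp only [pvStepB, pvStepA, if_pos hki, hc, hjget, Int.toNat_natCast, hcnt']
        have hsetB : ∀ (fL : List Int) (P : Nat → Bool) (w : Int),
            ((List.range (c + 1)).filter P).map (fun t => (fL.set i w).getD t 0) =
              ((List.range (c + 1)).filter P).map (fun t => fL.getD t 0) := by
          intro fL P w
          apply List.map_congr_left
          intro t ht
          have := List.mem_range.mp (List.mem_filter.mp ht).1
          simp [List.getD_eq_getElem?_getD, List.getElem?_set_ne (by omega : i ≠ t)]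
        -- premax over the updated inc tree
        have hIncU : ∀ q, q ≤ m →
            pvFenPreMax (pvFenUpdate stA.inc (m - pvRank S (origs.getD c 0)) (stA.fI.getD c 0)) 0 q =
              pvBmax 0 (((List.range (c + 1)).filter
                  (fun t => decide (m - pvRank S (origs.getD t 0) ≤ q))).map
                (fun t => stB.1.getD t 0)) := by
          intro q hq
          rw [pvPreMaxUpdate _ _ _ _ (by omega) (by rw [hIL]; omega) (by rw [hIL]; omega)]
          rw [hInc q hq, List.range_succ, List.filter_append, List.filter_cons,
            List.filter_nil, hc]
          simp only [Int.toNat_natCast]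
          by_cases hPc : m - pvRank S (origs.getD c 0) ≤ q
          · rw [if_pos hPc, if_pos (by simpa using hPc)]
            simp only [List.map_append, List.map_cons, List.map_nil, pvBmax_append]
            rw [hFI]
          · rw [if_neg hPc, if_neg (by simpa using hPc)]
            simp
        have hDecU : ∀ q, q ≤ m →
            pvFenPreMax (pvFenUpdate stA.dec (pvRank S (origs.getD c 0) + 1) (stA.fD.getD c 0)) 0 q =
              pvBmax 0 (((List.range (c + 1)).filter
                  (fun t => decide (pvRank S (origs.getD t 0) + 1 ≤ q))).map
                (fun t => stB.2.getD t 0)) := by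
          intro q hq
          rw [pvPreMaxUpdate _ _ _ _ (by omega) (by rw [hDL]; omega) (by rw [hDL]; omega)]
          rw [hDec q hq, List.range_succ, List.filter_append, List.filter_cons,
            List.filter_nil, hc]
          simp only [Int.toNat_natCast]
          by_cases hPc : pvRank S (origs.getD c 0) + 1 ≤ q
          · rw [if_pos hPc, if_pos (by simpa using hPc)]
            simp only [List.map_append, List.map_cons, List.map_nil, pvBmax_append]
            rw [hFD]
          · rw [if_neg hPc, if_neg (by simpa using hPc)]
            simp
        -- the two queries of this round agree with B's inner loop
        have hQ1 : pvFenPreMax (pvFenUpdate stA.dec (pvRank S (origs.getD c 0) + 1) (stA.fD.getD c 0)) 0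
              (PySem.List.bisectLeft S (stA.nums.getD i 0)) =
            (pvInnerB origs stB.1 stB.2 (origs.getD i 0) (c + 1)).1 := by
          rw [hbis, hDecU _ (by omega), pvInnerB_eq]
          congr 1
          apply congrArg
          apply List.filter_congr
          intro t ht
          have htc := List.mem_range.mp ht
          have hts : origs.getD t 0 ∈ S := hmemS t (by omega)
          have hiff := pvRank_lt_iff S hS _ hts (origs.getD i 0)
          apply decide_eq_decide.mpr
          omega
        have hQ2 : pvFenPreMax (pvFenUpdate stA.inc (m - pvRank S (origs.getD c 0)) (stA.fI.getD c 0)) 0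
              (m - 1 - PySem.List.bisectLeft S (stA.nums.getD i 0)) =
            (pvInnerB origs stB.1 stB.2 (origs.getD i 0) (c + 1)).2 := by
          rw [hbis, hIncU _ (by omega), pvInnerB_eq]
          congr 1
          apply congrArg
          apply List.filter_congr
          intro t ht
          have htc := List.mem_range.mp ht
          have hts : origs.getD t 0 ∈ S := hmemS t (by omega)
          have hrt : pvRank S (origs.getD t 0) < m := hr t (by omega)
          have hiff := pvRank_lt_iff S hS _ hxS (origs.getD t 0)
          apply decide_eq_decide.mpr
          omega
        refine ⟨?_, ?_, ?_, ?_, ?_, ?_, ?_, ?_, ?_, ?_⟩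
        · rw [hFI, hQ1, hx]
        · rw [hFD, hQ2, hx]
        · simp [List.length_set, hNL]
        · simp [List.length_set, hBL1]
        · simp [List.length_set, hBL2]
        · simp [pvFenUpdate_length, hIL]
        · simp [pvFenUpdate_length, hDL]
        · intro t ht
          by_cases hti : t = i
          · subst hti
            rw [List.getD_eq_getElem?_getD, List.getElem?_set_self (by rw [hNL]; omega),
              Option.getD_some, if_pos (by omega : t < t + 1)]
            simp only [hx]
            rfl
          · rw [List.getD_eq_getElem?_getD, List.getElem?_set_ne (by omega : i ≠ t),
              ← List.getD_eq_getElem?_getD, hNums t ht]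
            by_cases htl : t < i
            · rw [if_pos htl, if_pos (by omega)]
            · rw [if_neg htl, if_neg (by omega)]
        · intro q hq
          rw [hc1, hsetB, hIncU q hq]
        · intro q hq
          rw [hc1, hsetB, hDecU q hq]
      · -- no insertion this round: i < k, nothing is in the trees yet
        have h0 : ((i : Int) - k).toNat = 0 := by omega
        have h01 : (((i + 1 : Nat) : Int) - k).toNat = 0 := by push_cast; omega
        have hcnt0 : (((i : Int) - k + 1)).toNat = 0 := by omega
        simp only [pvStepB, pvStepA, if_neg hki, hcnt0]
        have hzero1 : ∀ q, q ≤ m → pvFenPreMax stA.inc 0 q = 0 := by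
          intro q hq
          rw [hInc q hq, h0]
          simp only [List.range_zero, List.filter_nil, List.map_nil]
          rfl
        have hzero2 : ∀ q, q ≤ m → pvFenPreMax stA.dec 0 q = 0 := by
          intro q hq
          rw [hDec q hq, h0]
          simp only [List.range_zero, List.filter_nil, List.map_nil]
          rfl
        have hinner0 : pvInnerB origs stB.1 stB.2 (origs.getD i 0) 0 = (0, 0) := rfl
        refine ⟨?_, ?_, ?_, ?_, ?_, ?_, ?_, ?_, ?_, ?_⟩
        · rw [hFI, hinner0, hzero2 _ (by have := hrx; omega), hx]
        · rw [hFD, hinner0, hzero1 _ (by omega), hx]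
        · simp [List.length_set, hNL]
        · simp [List.length_set, hBL1]
        · simp [List.length_set, hBL2]
        · exact hIL
        · exact hDL
        · intro t ht
          by_cases hti : t = i
          · subst hti
            rw [List.getD_eq_getElem?_getD, List.getElem?_set_self (by rw [hNL]; omega),
              Option.getD_some, if_pos (by omega : t < t + 1)]
            simp only [hx]
            rfl
          · rw [List.getD_eq_getElem?_getD, List.getElem?_set_ne (by omega : i ≠ t),
              ← List.getD_eq_getElem?_getD, hNums t ht]
            by_cases htl : t < i
            · rw [if_pos htl, if_pos (by omega)]
            · rw [if_neg htl, if_neg (by omega)]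
        · intro q hq
          rw [h01]
          simp only [List.range_zero, List.filter_nil, List.map_nil]
          exact hzero1 q hq
        · intro q hq
          rw [h01]
          simp only [List.range_zero, List.filter_nil, List.map_nil]
          exact hzero2 q hq

-- ===== VERDICT (by name: the statement is the Claim_ definition above) =====
theorem maxAlternatingSum_spec : Claim_equal_maxAlternatingSum := by
  unfold Claim_equal_maxAlternatingSum
  intro nums k _ hpre
  obtain ⟨hne, hk⟩ := hpre
  unfold Spec_maxAlternatingSum maxAlternatingSum maxAlternatingSum_alt
  simp only []
  rw [pvFoldA, pvFoldB]
  obtain ⟨h1, h2, _⟩ := pvInvariant nums k hne hk nums.length le_rfl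
  unfold pvS at h1 h2
  rw [h1, h2]
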